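-- pv_equiv track=rewrite | github.com/geoffthorpe/newhcp | hcp/python/gson/path.py | path_pop_member
-- ===== SOURCE A (Python) =====
-- def path_pop_member(path):
--     member = ''
--     while len(path) > 0 and path[0] != '.' and path[0] != '[':
--         c = path[0]
--         path = path[1:]
--         if c == '\\' and len(path) > 0 and path[0] == '.':
--             c = '.'
--             path = path[1:]
--         if c == '\\' and len(path) > 0 and path[0] == '[':
--             c = '['
--             path = path[1:]
--         member += c
--     return path, member
-- ===== SOURCE B (Python) =====
-- def path_pop_member(path):
--     # Find the end of the leading member token: stop at the first unescaped
--     # '.' or '[' (a backslash escapes a following '.' or '['), then slice and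
--     # unescape the token with str.replace.
--     n, L = 0, len(path)
--     while n < L and path[n] not in '.[':
--         n += 2 if path[n] == '\\' and n + 1 < L and path[n + 1] in '.[' else 1
--     return path[n:], path[:n].replace('\\.', '.').replace('\\[', '[')
-- ===== Notes on version B (the rewrite author's own statement) =====
-- stated objective: faster
-- what changed: Replaced A's character-consuming accumulator loop (repeated slicing path=path[1:] and member+=c with sequential escape re-binding of c) by an index scan that only locates the token boundary, followed by one slice and unescaping via two str.replace calls.
import Mathlib
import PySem

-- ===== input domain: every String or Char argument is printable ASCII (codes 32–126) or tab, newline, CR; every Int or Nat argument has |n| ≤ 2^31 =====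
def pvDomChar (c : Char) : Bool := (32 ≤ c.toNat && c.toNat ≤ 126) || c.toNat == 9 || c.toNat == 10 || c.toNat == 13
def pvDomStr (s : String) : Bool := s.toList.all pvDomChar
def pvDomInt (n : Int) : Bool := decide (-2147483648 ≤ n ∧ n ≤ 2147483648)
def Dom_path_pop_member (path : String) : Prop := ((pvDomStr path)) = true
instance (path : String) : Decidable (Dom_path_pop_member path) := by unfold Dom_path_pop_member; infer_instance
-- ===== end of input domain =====

-- B replaces A's char-consuming accumulator loop by an index scan for the token
-- boundary plus one slice and two str.replace unescapes (objective: faster; the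
-- timing run measured B ≥ 1.5× faster at the largest size).

-- ===== PORT A =====
-- A's while loop: pops path[0] into c, then the two sequential escape ifs
-- (after the first fires, c is '.', so the second cannot), appends c to member.
def pathPopMemberLoopA : List Char → List Char → List Char × List Char
  | [], member => ([], member)
  | c :: rest, member =>
    if c = '.' ∨ c = '[' then (c :: rest, member)
    else if c = '\\' then
      match h : rest with
      | d :: r2 =>
        if d = '.' then pathPopMemberLoopA r2 (member ++ ['.'])
        else if d = '[' then pathPopMemberLoopA r2 (member ++ ['['])
        else pathPopMemberLoopA rest (member ++ ['\\'])
      | [] => pathPopMemberLoopA [] (member ++ ['\\'])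
    else pathPopMemberLoopA rest (member ++ [c])
termination_by cs _ => cs.length
decreasing_by all_goals simp_all

def path_pop_member (path : String) : List String :=
  let r := pathPopMemberLoopA path.toList []
  [String.ofList r.1, String.ofList r.2]

-- ===== PORT B =====
-- Source B's index loop 'while n < L and path[n] not in ".[": n += 2 if … else 1',
-- ported as a recursion over the character list computing the boundary n.
def pathPopMemberScanB : List Char → Nat
  | [] => 0
  | c :: rest =>
    if c = '.' ∨ c = '[' then 0
    else if c = '\\' then
      match rest with
      | d :: r2 => if d = '.' ∨ d = '[' then 2 + pathPopMemberScanB r2 else 1 + pathPopMemberScanB (d :: r2)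
      | [] => 1
    else 1 + pathPopMemberScanB rest

def path_pop_member_alt (path : String) : List String :=
  let cs := path.toList
  let n := pathPopMemberScanB cs
  [String.ofList (cs.drop n),
   PySem.Str.replace (PySem.Str.replace (String.ofList (cs.take n)) "\\." ".") "\\[" "["]

-- ===== PRECONDITION & SPEC =====
def Spec_path_pop_member (path : String) (out : List String) : Prop := out = path_pop_member_alt path
instance (path : String) (out : List String) : Decidable (Spec_path_pop_member path out) := by unfold Spec_path_pop_member; infer_instance

-- ===== CLAIM (what is proved, stated in full; the proofs are below) =====
def Claim_equal_path_pop_member : Prop := ∀ (path : String), Dom_path_pop_member path → Spec_path_pop_member path (path_pop_member path)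

-- ===== LEMMAS AND PROOFS =====

-- One left-to-right unescape pass: '\.'→'.', '\['→'[', everything else copied.
def pvUnesc : List Char → List Char
  | [] => []
  | c :: t =>
    if c = '\\' then
      match t with
      | d :: r => if d = '.' ∨ d = '[' then d :: pvUnesc r else '\\' :: pvUnesc (d :: r)
      | [] => ['\\']
    else c :: pvUnesc t

-- One replace pass for old = ['\\', x], new = [x] (what Chars.replace.go does).
def pvRep1 (x : Char) : List Char → List Char
  | [] => []
  | c :: t =>
    if c = '\\' then
      match t with
      | d :: r => if d = x then x :: pvRep1 x r else '\\' :: pvRep1 x (d :: r)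
      | [] => ['\\']
    else c :: pvRep1 x t

theorem pvRep1_go (x : Char) : ∀ (fuel : Nat) (l acc : List Char), l.length ≤ fuel →
    PySem.Chars.replace.go ['\\', x] [x] fuel l acc = acc.reverse ++ pvRep1 x l := by
  intro fuel
  induction fuel with
  | zero =>
    intro l acc h
    have : l = [] := by cases l <;> simp_all
    subst this
    rw [PySem.Chars.replace.go]
    simp [pvRep1]
  | succ n ih =>
    intro l acc h
    cases l with
    | nil =>
      rw [PySem.Chars.replace.go]; simp [pvRep1]; omega
    | cons c t =>
      rw [PySem.Chars.replace.go]
      by_cases hp : ['\\', x].isPrefixOf (c :: t) = true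
      · simp only [hp, if_true]
        rcases t with _ | ⟨d, r⟩
        · simp [List.isPrefixOf] at hp
        · have hc : '\\' = c ∧ x = d := by simpa [List.isPrefixOf] using hp
          obtain ⟨rfl, rfl⟩ := hc
          have hr : r.length ≤ n := by simp at h; omega
          rw [show List.drop (['\\', x].length) ('\\' :: x :: r) = r by simp]
          rw [ih r ([x].reverse ++ acc) hr]
          simp [pvRep1]
      · simp only [hp]
        have ht : t.length ≤ n := by simp at h; omega
        rw [ih t (c :: acc) ht]
        have : pvRep1 x (c :: t) = c :: pvRep1 x t := by
          rcases t with _ | ⟨d, r⟩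
          · by_cases hc : c = '\\' <;> simp [pvRep1, hc]
          · by_cases hc : c = '\\'
            · subst hc
              have hd : ¬ d = x := by intro hh; exact hp (by simp [List.isPrefixOf, hh])
              simp [pvRep1, hd]
            · simp [pvRep1, hc]
        simp [this]

theorem pvReplace_eq_rep1 (x : Char) (l : List Char) :
    PySem.Chars.replace l ['\\', x] [x] = pvRep1 x l := by
  rw [PySem.Chars.replace]
  simpa using pvRep1_go x l.length l [] le_rfl

-- small rewrite rules for pvRep1 / pvUnesc / pathPopMemberScanB
theorem pvRep1_cons_ne (x c : Char) (t : List Char) (h : c ≠ '\\') :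
    pvRep1 x (c :: t) = c :: pvRep1 x t := by
  cases t <;> simp [pvRep1, h]

theorem pvRep1_esc (x : Char) (t : List Char) : pvRep1 x ('\\' :: x :: t) = x :: pvRep1 x t := by
  simp [pvRep1]

theorem pvRep1_bs_ne (x d : Char) (r : List Char) (h : d ≠ x) :
    pvRep1 x ('\\' :: d :: r) = '\\' :: pvRep1 x (d :: r) := by
  simp [pvRep1, h]

theorem pvRep1_bs_nil (x : Char) : pvRep1 x ['\\'] = ['\\'] := by simp [pvRep1]

theorem pvUnesc_cons_ne (c : Char) (t : List Char) (h : c ≠ '\\') :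
    pvUnesc (c :: t) = c :: pvUnesc t := by
  cases t <;> simp [pvUnesc, h]

theorem pvUnesc_esc (d : Char) (r : List Char) (h : d = '.' ∨ d = '[') :
    pvUnesc ('\\' :: d :: r) = d :: pvUnesc r := by
  simp [pvUnesc, h]

theorem pvUnesc_bs_ne (d : Char) (r : List Char) (h : ¬(d = '.' ∨ d = '[')) :
    pvUnesc ('\\' :: d :: r) = '\\' :: pvUnesc (d :: r) := by
  simp [pvUnesc, h]

theorem pvUnesc_bs_nil : pvUnesc ['\\'] = ['\\'] := by simp [pvUnesc]

theorem pvScan_special (c : Char) (t : List Char) (h : c = '.' ∨ c = '[') :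
    pathPopMemberScanB (c :: t) = 0 := by
  cases t <;> simp [pathPopMemberScanB, h]

theorem pvScan_esc (d : Char) (r : List Char) (h : d = '.' ∨ d = '[') :
    pathPopMemberScanB ('\\' :: d :: r) = 2 + pathPopMemberScanB r := by
  simp [pathPopMemberScanB, h]

theorem pvScan_bs_ne (d : Char) (r : List Char) (h : ¬(d = '.' ∨ d = '[')) :
    pathPopMemberScanB ('\\' :: d :: r) = 1 + pathPopMemberScanB (d :: r) := by
  simp [pathPopMemberScanB, h]

theorem pvScan_bs_nil : pathPopMemberScanB ['\\'] = 1 := by simp [pathPopMemberScanB]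

theorem pvScan_cons_ne (c : Char) (t : List Char) (hs : ¬(c = '.' ∨ c = '[')) (h : c ≠ '\\') :
    pathPopMemberScanB (c :: t) = 1 + pathPopMemberScanB t := by
  cases t <;> simp [pathPopMemberScanB, hs, h]

-- pvRep1 '.' of a nonempty list not starting with '[' starts with a non-'[' char
theorem pvRep1_dot_head (d : Char) (r : List Char) (hd : d ≠ '[') :
    ∃ z tl, pvRep1 '.' (d :: r) = z :: tl ∧ z ≠ '[' := by
  by_cases hb : d = '\\'
  · subst hb
    rcases r with _ | ⟨e, s⟩
    · exact ⟨'\\', [], pvRep1_bs_nil '.', by decide⟩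
    · by_cases he : e = '.'
      · subst he; exact ⟨'.', pvRep1 '.' s, pvRep1_esc '.' s, by decide⟩
      · exact ⟨'\\', pvRep1 '.' (e :: s), pvRep1_bs_ne '.' e s he, by decide⟩
  · exact ⟨d, pvRep1 '.' r, pvRep1_cons_ne '.' d r hb, hd⟩

-- the two replace passes together are the one-pass unescape
theorem pvChain : ∀ (n : Nat) (cs : List Char), cs.length ≤ n →
    pvRep1 '[' (pvRep1 '.' cs) = pvUnesc cs := by
  intro n
  induction n with
  | zero =>
    intro cs h
    have : cs = [] := by cases cs <;> simp_all
    subst this; rfl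
  | succ n ih =>
    intro cs h
    rcases cs with _ | ⟨c, t⟩
    · rfl
    · by_cases hc : c = '\\'
      · subst hc
        rcases t with _ | ⟨d, r⟩
        · rw [pvRep1_bs_nil, pvRep1_bs_nil, pvUnesc_bs_nil]
        · by_cases hd : d = '.'
          · subst hd
            rw [pvRep1_esc, pvRep1_cons_ne '[' '.' _ (by decide),
                ih r (by simp at h; omega), pvUnesc_esc '.' r (by decide)]
          · by_cases hd2 : d = '['
            · subst hd2
              rw [pvRep1_bs_ne '.' '[' r (by decide), pvRep1_cons_ne '.' '[' r (by decide),
                  pvRep1_esc, ih r (by simp at h; omega), pvUnesc_esc '[' r (by decide)]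
            · obtain ⟨z, tl, hz, hzne⟩ := pvRep1_dot_head d r hd2
              rw [pvRep1_bs_ne '.' d r hd, hz, pvRep1_bs_ne '[' z tl hzne, ← hz,
                  ih (d :: r) (by simp at h ⊢; omega),
                  pvUnesc_bs_ne d r (by simp [hd, hd2])]
      · rw [pvRep1_cons_ne '.' c t hc, pvRep1_cons_ne '[' c _ hc,
            ih t (by simp at h; omega), pvUnesc_cons_ne c t hc]

theorem pvScan_pos (d : Char) (r : List Char) (h : ¬(d = '.' ∨ d = '[')) :
    ∃ m, pathPopMemberScanB (d :: r) = m + 1 := by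
  by_cases hb : d = '\\'
  · subst hb
    rcases r with _ | ⟨e, r2⟩
    · exact ⟨0, pvScan_bs_nil⟩
    · by_cases he : e = '.' ∨ e = '['
      · exact ⟨1 + pathPopMemberScanB r2, by rw [pvScan_esc e r2 he]; omega⟩
      · exact ⟨pathPopMemberScanB (e :: r2), by rw [pvScan_bs_ne e r2 he]; omega⟩
  · exact ⟨pathPopMemberScanB r, by rw [pvScan_cons_ne d r h hb]; omega⟩

-- A's loop = drop/take at B's boundary, with the member unescaped
theorem pvLoopA_eq : ∀ (n : Nat) (cs acc : List Char), cs.length ≤ n →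
    pathPopMemberLoopA cs acc =
      (cs.drop (pathPopMemberScanB cs), acc ++ pvUnesc (cs.take (pathPopMemberScanB cs))) := by
  intro n
  induction n with
  | zero =>
    intro cs acc h
    have : cs = [] := by cases cs <;> simp_all
    subst this; simp [pathPopMemberLoopA]; rfl
  | succ n ih =>
    intro cs acc h
    rcases cs with _ | ⟨c, t⟩
    · simp [pathPopMemberLoopA]; rfl
    · by_cases hs : c = '.' ∨ c = '['
      · rw [pvScan_special c t hs]
        rcases hs with rfl | rfl <;> cases t <;> simp [pathPopMemberLoopA, pvUnesc]
      · by_cases hc : c = '\\'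
        · subst hc
          rcases t with _ | ⟨d, r⟩
          · rw [pvScan_bs_nil]
            simp only [pathPopMemberLoopA, hs, if_false, if_true]
            simp [pvUnesc_bs_nil]
          · by_cases hd : d = '.'
            · subst hd
              rw [pvScan_esc '.' r (by decide)]
              simp only [pathPopMemberLoopA, hs, if_false, reduceIte]
              rw [ih r (acc ++ ['.']) (by simp at h; omega)]
              have : List.take (2 + pathPopMemberScanB r) ('\\' :: '.' :: r) =
                  '\\' :: '.' :: List.take (pathPopMemberScanB r) r := by
                simp [List.take_succ_cons, show 2 + pathPopMemberScanB r =
                  (pathPopMemberScanB r) + 1 + 1 by omega]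
              rw [this, pvUnesc_esc '.' _ (by decide)]
              simp [show 2 + pathPopMemberScanB r = (pathPopMemberScanB r) + 1 + 1 by omega]
            · by_cases hd2 : d = '['
              · subst hd2
                rw [pvScan_esc '[' r (by decide)]
                simp only [pathPopMemberLoopA, hs, if_false, reduceIte, hd]
                rw [ih r (acc ++ ['[']) (by simp at h; omega)]
                have : List.take (2 + pathPopMemberScanB r) ('\\' :: '[' :: r) =
                    '\\' :: '[' :: List.take (pathPopMemberScanB r) r := by
                  simp [List.take_succ_cons, show 2 + pathPopMemberScanB r =
                    (pathPopMemberScanB r) + 1 + 1 by omega]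
                rw [this, pvUnesc_esc '[' _ (by decide)]
                simp [show 2 + pathPopMemberScanB r = (pathPopMemberScanB r) + 1 + 1 by omega]
              · have hds : ¬(d = '.' ∨ d = '[') := by simp [hd, hd2]
                rw [pvScan_bs_ne d r hds]
                simp only [pathPopMemberLoopA, hs, if_false, reduceIte, hd, hd2]
                rw [ih (d :: r) (acc ++ ['\\']) (by simp at h ⊢; omega)]
                obtain ⟨m, hm⟩ := pvScan_pos d r hds
                rw [hm]
                have : List.take (1 + (m + 1)) ('\\' :: d :: r) =
                    '\\' :: List.take (m + 1) (d :: r) := by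
                  simp [show 1 + (m + 1) = (m + 1) + 1 by omega]
                rw [this, List.take_succ_cons, pvUnesc_bs_ne d _ hds, ← List.take_succ_cons]
                simp [show 1 + (m + 1) = (m + 1) + 1 by omega]
        · rw [pvScan_cons_ne c t hs hc]
          have hstep : pathPopMemberLoopA (c :: t) acc = pathPopMemberLoopA t (acc ++ [c]) := by
            cases t <;> simp [pathPopMemberLoopA, hs, hc]
          rw [hstep, ih t (acc ++ [c]) (by simp at h; omega)]
          simp [show 1 + pathPopMemberScanB t = (pathPopMemberScanB t) + 1 by omega,
            pvUnesc_cons_ne c _ hc]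

-- ===== VERDICT (by name: the statement is the Claim_ definition above) =====
theorem path_pop_member_spec : Claim_equal_path_pop_member := by
  intro path _
  unfold Spec_path_pop_member path_pop_member path_pop_member_alt
  rw [pvLoopA_eq path.toList.length path.toList [] le_rfl]
  simp only [PySem.Str.replace]
  rw [show ("\\." : String).toList = ['\\', '.'] from rfl,
      show ("\\[" : String).toList = ['\\', '['] from rfl,
      show ("." : String).toList = ['.'] from rfl,
      show ("[" : String).toList = ['['] from rfl]
  simp [pvReplace_eq_rep1,
    pvChain (path.toList.take (pathPopMemberScanB path.toList)).length _ le_rfl]
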